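-- pv_equiv track=rewrite | github.com/seshainn/dsa-python | Recursion.py | retAllSubsetsSumK
-- ===== SOURCE A (Python) =====
-- def retAllSubsetsSumK(arr, k, index=0, current_subset=[]):
--     if index == len(arr):
--         if sum(current_subset) == k:
--           return [current_subset]
--         else:
--           return []
--
--     include_current = retAllSubsetsSumK(arr, k, index + 1, current_subset + [arr[index]])
--     exclude_current = retAllSubsetsSumK(arr, k, index + 1, current_subset)
--
--     return include_current + exclude_current
-- ===== SOURCE B (Python) =====
-- def retAllSubsetsSumK(arr, k, index=0, current_subset=[]):
--     # iterative bottom-up: build all tail-choices for arr[index:] back-to-front, then filter by sum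
--     tails = [[]]
--     for i in range(len(arr) - 1, index - 1, -1):
--         tails = [[arr[i]] + t for t in tails] + tails
--     return [current_subset + t for t in tails if sum(current_subset + t) == k]
-- ===== Notes on version B (the rewrite author's own statement) =====
-- stated objective: alternative
-- what changed: Replaces A's include/exclude binary recursion by an iterative bottom-up loop that builds all tail-choice lists for arr[index:] back-to-front, followed by a single filtering pass selecting the subsets summing to k (same output order).
import Mathlib
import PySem

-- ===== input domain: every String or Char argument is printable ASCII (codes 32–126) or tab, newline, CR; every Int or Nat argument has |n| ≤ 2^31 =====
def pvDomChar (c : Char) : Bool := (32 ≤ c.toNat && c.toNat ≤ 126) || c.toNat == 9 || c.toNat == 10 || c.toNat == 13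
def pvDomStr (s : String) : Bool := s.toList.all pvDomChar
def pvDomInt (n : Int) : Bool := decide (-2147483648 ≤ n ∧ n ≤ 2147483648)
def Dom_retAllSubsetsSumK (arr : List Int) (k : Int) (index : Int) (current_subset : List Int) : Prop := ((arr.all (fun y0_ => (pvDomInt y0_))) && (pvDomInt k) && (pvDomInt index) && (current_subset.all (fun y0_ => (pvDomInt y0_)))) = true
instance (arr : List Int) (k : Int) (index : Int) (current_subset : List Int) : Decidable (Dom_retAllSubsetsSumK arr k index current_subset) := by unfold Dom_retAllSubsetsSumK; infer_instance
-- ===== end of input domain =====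

-- B replaces A's include/exclude recursion by an iterative bottom-up construction of all
-- tail-choices followed by one filtering pass (objective: alternative decomposition, same cost).

-- ===== PORT A =====
-- literal transliteration of A's recursion; the `none` branch is Python's IndexError
-- (arr[index] out of range), excluded by Pre_.
def retAllSubsetsSumK (arr : List Int) (k : Int) (index : Int) (current_subset : List Int) : List (List Int) :=
  if index = PySem.List.len arr then
    (if current_subset.sum = k then [current_subset] else [])
  else
    match h : PySem.List.pyGet? arr index with
    | none => []
    | some v =>
        retAllSubsetsSumK arr k (index + 1) (current_subset ++ [v]) ++
        retAllSubsetsSumK arr k (index + 1) current_subset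
termination_by ((arr.length : Int) - index).toNat
decreasing_by
  all_goals
    have hin : PySem.Raise.InRange arr.length index := by
      by_contra hc
      rw [← PySem.List.pyGet?_eq_none_iff] at hc
      simp [hc] at h
    obtain ⟨h1, h2⟩ := hin
    omega

-- ===== PORT B =====
-- transliteration of Source B: tails loop over range(len(arr)-1, index-1, -1), then the
-- filtering comprehension; arr[i] is pyGetD (every i the loop visits is in range inside Pre_).
def retAllSubsetsSumK_alt (arr : List Int) (k : Int) (index : Int) (current_subset : List Int) : List (List Int) :=
  let tails :=
    (PySem.List.pyRange (PySem.List.len arr - 1) (index - 1) (-1)).foldl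
      (fun ts i => ts.map (fun t => PySem.List.pyGetD arr i 0 :: t) ++ ts) [[]]
  tails.filterMap (fun t =>
    if (current_subset ++ t).sum = k then some (current_subset ++ t) else none)

-- ===== PRECONDITION & SPEC =====
-- Pre_ excludes exactly the inputs where A raises IndexError (index above len(arr) or below
-- -len(arr)); A returns normally everywhere else, including negative indices ≥ -len(arr).
def Pre_retAllSubsetsSumK (arr : List Int) (k : Int) (index : Int) (current_subset : List Int) : Prop :=
  -(arr.length : Int) ≤ index ∧ index ≤ (arr.length : Int)
instance (arr : List Int) (k : Int) (index : Int) (current_subset : List Int) : Decidable (Pre_retAllSubsetsSumK arr k index current_subset) := by unfold Pre_retAllSubsetsSumK; infer_instance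

def pvWitness_retAllSubsetsSumK : List Int × Int × Int × List Int := ([1, 2, 3], 3, 0, [])

def Spec_retAllSubsetsSumK (arr : List Int) (k : Int) (index : Int) (current_subset : List Int) (out : List (List Int)) : Prop := out = retAllSubsetsSumK_alt arr k index current_subset
instance (arr : List Int) (k : Int) (index : Int) (current_subset : List Int) (out : List (List Int)) : Decidable (Spec_retAllSubsetsSumK arr k index current_subset out) := by unfold Spec_retAllSubsetsSumK; infer_instance

-- ===== CLAIM (what is proved, stated in full; the proofs are below) =====
def Claim_equal_retAllSubsetsSumK : Prop := ∀ (arr : List Int) (k : Int) (index : Int) (current_subset : List Int), Dom_retAllSubsetsSumK arr k index current_subset → Pre_retAllSubsetsSumK arr k index current_subset → Spec_retAllSubsetsSumK arr k index current_subset (retAllSubsetsSumK arr k index current_subset)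

-- ===== LEMMAS AND PROOFS =====

-- the binary tree of include/exclude choices over a list of values, include first
def pvChoices : List Int → List (List Int)
  | [] => [[]]
  | x :: xs => (pvChoices xs).map (x :: ·) ++ pvChoices xs

-- the values A reads: arr[i] for i in range(index, len(arr))
def pvSeq (arr : List Int) (index : Int) : List Int :=
  (PySem.List.pyRange index (arr.length : Int) 1).map (fun i => PySem.List.pyGetD arr i 0)

lemma pvSeq_nil (arr : List Int) (index : Int) (h : (arr.length : Int) ≤ index) :
    pvSeq arr index = [] := by
  simp [pvSeq, PySem.List.pyRange_one_eq_nil h]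

lemma pvSeq_cons (arr : List Int) (index : Int) (h : index < (arr.length : Int)) :
    pvSeq arr index = PySem.List.pyGetD arr index 0 :: pvSeq arr (index + 1) := by
  simp [pvSeq, PySem.List.pyRange_one_cons h]

lemma pvA_char (n : Nat) : ∀ (arr : List Int) (k index : Int) (cs : List Int),
    -(arr.length : Int) ≤ index → index + (n : Int) = (arr.length : Int) →
    retAllSubsetsSumK arr k index cs =
      (pvChoices (pvSeq arr index)).filterMap
        (fun t => if (cs ++ t).sum = k then some (cs ++ t) else none) := by
  induction n with
  | zero =>
      intro arr k index cs _ h2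
      have hix : index = PySem.List.len arr := by simp [PySem.List.len_eq]; omega
      rw [retAllSubsetsSumK, if_pos hix,
        pvSeq_nil arr index (by omega)]
      split_ifs with hs <;> simp [pvChoices, List.filterMap, hs]
  | succ m ih =>
      intro arr k index cs h1 h2
      have hlt : index < (arr.length : Int) := by omega
      have hget : PySem.List.pyGet? arr index = some (PySem.List.pyGetD arr index 0) := by
        cases hx : PySem.List.pyGet? arr index with
        | none =>
            rw [PySem.List.pyGet?_eq_none_iff] at hx
            exact absurd ⟨h1, hlt⟩ hx
        | some v => simp [PySem.List.pyGetD, hx]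
      have hne : index ≠ PySem.List.len arr := by simp [PySem.List.len_eq]; omega
      rw [retAllSubsetsSumK, if_neg hne]
      rw [pvSeq_cons arr index hlt]
      simp only [pvChoices, List.filterMap_append, List.filterMap_map]
      split
      · next heq => rw [hget] at heq; exact absurd heq (by simp)
      · next v heq =>
          rw [hget] at heq
          injection heq with hv
          subst hv
          rw [ih arr k (index + 1) (cs ++ [PySem.List.pyGetD arr index 0]) (by omega) (by omega),
            ih arr k (index + 1) cs (by omega) (by omega)]
          congr 1
          apply List.filterMap_congr
          intro t _
          simp

lemma pvFold_choices (g : Int → Int) : ∀ (is : List Int),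
    is.reverse.foldl (fun ts i => ts.map (fun t => g i :: t) ++ ts) [[]]
      = pvChoices (is.map g) := by
  intro is
  induction is with
  | nil => simp [pvChoices]
  | cons x rest ih =>
      simp only [List.reverse_cons, List.foldl_append, ih, List.map_cons, pvChoices,
        List.foldl_cons, List.foldl_nil]

lemma pvB_char (arr : List Int) (k index : Int) (cs : List Int) :
    retAllSubsetsSumK_alt arr k index cs =
      (pvChoices (pvSeq arr index)).filterMap
        (fun t => if (cs ++ t).sum = k then some (cs ++ t) else none) := by
  unfold retAllSubsetsSumK_alt
  have hrange : PySem.List.pyRange (PySem.List.len arr - 1) (index - 1) (-1)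
      = (PySem.List.pyRange index (arr.length : Int) 1).reverse := by
    rw [PySem.List.pyRange_neg_one_eq_reverse]
    simp [PySem.List.len_eq]
  rw [hrange]
  have := pvFold_choices (fun i => PySem.List.pyGetD arr i 0)
    (PySem.List.pyRange index (arr.length : Int) 1)
  simp only [this]
  rfl

-- ===== VERDICT (by name: the statement is the Claim_ definition above) =====
theorem retAllSubsetsSumK_spec : Claim_equal_retAllSubsetsSumK := by
  intro arr k index cs _ hpre
  obtain ⟨hp1, hp2⟩ := hpre
  unfold Spec_retAllSubsetsSumK
  rw [pvA_char ((arr.length : Int) - index).toNat arr k index cs hp1 (by omega),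
    pvB_char arr k index cs]
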